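-- pv_equiv track=rewrite | github.com/lcmiles/MA-360 | Projects/Project 3/patience_sort_stack_heights.py | patience_sort
-- ===== SOURCE A (Python) =====
-- import bisect
--
-- def patience_sort(permlist):
--     #This function creates a multi-dimensional array
--     #containing all of the stacks
--     #of the patience sorting algorithm
--     #Input :
--     # permlist : list of numbers to sort
--     #Output :
--     # stacks : a list of lists of integers
--     #
--     # Each entry in stacks is a list of integers,
--     #which are the card values in that stack
--
--     stacks = []
--     for x in permlist : #iterate through list of numbers
--         temp_stack = [x]
--         i = bisect.bisect_left(stacks, temp_stack)
--         #determines where number should be inserted if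
--         # it was to be inserted in order
--         if i != len(stacks) :
--             # if number is not larger than all numbers on top
--
--             #of stacks
--             stacks[i].insert(0,x) #put number on appropriate stack
--         else :
--             stacks.append(temp_stack) #create new stack
--
--     return stacks
-- ===== SOURCE B (Python) =====
-- def patience_sort(permlist):
--     # Two-phase algorithm, no bisect and no incremental stack state:
--     # phase 1 computes each card's pile number = length of the longest strictly
--     # increasing subsequence ending at that card (classic patience-sort fact);
--     # phase 2 buckets the cards into their piles in one backward pass, so each
--     # pile lists its newest card first.
--     pile = []
--     for x in permlist:
--         best = 0
--         for y, v in zip(permlist, pile):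
--             if y < x and v > best:
--                 best = v
--         pile.append(best + 1)
--     stacks = [[] for _ in range(max(pile, default=0))]
--     for x, v in reversed(list(zip(permlist, pile))):
--         stacks[v - 1].append(x)
--     return stacks
-- ===== Notes on version B (the rewrite author's own statement) =====
-- stated objective: alternative
-- what changed: Replaces the incremental patience loop (bisect over the growing list of stacks plus insert(0,x)) by a two-phase algorithm: a DP that gives each card its pile number as the length of the longest strictly increasing subsequence ending at it, then one backward bucketing pass that builds all stacks at once.
import Mathlib
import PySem

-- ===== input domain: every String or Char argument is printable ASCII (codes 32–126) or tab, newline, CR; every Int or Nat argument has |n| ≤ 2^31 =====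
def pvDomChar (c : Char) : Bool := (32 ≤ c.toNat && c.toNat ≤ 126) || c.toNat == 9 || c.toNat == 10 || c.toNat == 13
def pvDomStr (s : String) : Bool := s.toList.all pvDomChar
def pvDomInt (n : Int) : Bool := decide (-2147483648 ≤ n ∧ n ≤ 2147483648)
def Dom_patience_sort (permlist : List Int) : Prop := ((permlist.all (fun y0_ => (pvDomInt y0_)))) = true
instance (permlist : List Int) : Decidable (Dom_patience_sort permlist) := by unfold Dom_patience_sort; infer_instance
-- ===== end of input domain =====

-- B replaces A's incremental patience loop (bisect over the growing list of stacks,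
-- insert(0,x)) by a two-phase algorithm: a DP giving each card its pile number
-- (= length of the longest strictly increasing subsequence ending at it),
-- then one backward bucketing pass building all stacks at once (alternative, not faster).

-- ===== PORT A =====
def pvStepA (sts : List (List Int)) (x : Int) : List (List Int) :=
  let temp_stack := [x]
  let i := PySem.List.bisectLeft sts temp_stack   -- bisect.bisect_left(stacks, temp_stack)
  if i ≠ sts.length then
    sts.set i (PySem.List.insert (sts.getD i []) 0 x)   -- stacks[i].insert(0, x)
  else
    sts ++ [temp_stack]   -- stacks.append(temp_stack)

def patience_sort (permlist : List Int) : List (List Int) :=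
  permlist.foldl pvStepA []

-- ===== PORT B =====
-- inner loop: for y, v in zip(permlist, pile): if y < x and v > best: best = v
def pvBest (permlist pile : List Int) (x : Int) : Int :=
  (permlist.zip pile).foldl (fun best yv => if yv.1 < x ∧ yv.2 > best then yv.2 else best) 0

-- phase 1: pile.append(best + 1) for each card
def pvPileList (permlist : List Int) : List Int :=
  permlist.foldl (fun pile x => pile ++ [pvBest permlist pile x + 1]) []

def patience_sort_alt (permlist : List Int) : List (List Int) :=
  let pile := pvPileList permlist
  -- stacks = [[] for _ in range(max(pile, default=0))]
  let sts := List.replicate (PySem.List.maxD pile (fun v => v) 0).toNat ([] : List Int)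
  -- for x, v in reversed(list(zip(permlist, pile))): stacks[v - 1].append(x)
  ((permlist.zip pile).reverse).foldl
    (fun st xv => st.set (xv.2 - 1).toNat (st.getD (xv.2 - 1).toNat [] ++ [xv.1])) sts

-- ===== PRECONDITION & SPEC =====
def Spec_patience_sort (permlist : List Int) (out : List (List Int)) : Prop := out = patience_sort_alt permlist
instance (permlist : List Int) (out : List (List Int)) : Decidable (Spec_patience_sort permlist out) := by unfold Spec_patience_sort; infer_instance

-- ===== CLAIM (what is proved, stated in full; the proofs are below) =====
def Claim_equal_patience_sort : Prop := ∀ (permlist : List Int), Dom_patience_sort permlist → Spec_patience_sort permlist (patience_sort permlist)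

-- ===== LEMMAS AND PROOFS =====

-- proof-only abbreviations
def pvPairs (p : List Int) : List (Int × Int) := p.zip (pvPileList p)
def pvK (p : List Int) : Int := (pvPileList p).foldl max 0
def pvFilt (p : List Int) (m : Int) : List (Int × Int) :=
  (pvPairs p).filter (fun yv => yv.2 == m)
def pvBuckets (p : List Int) : List (List Int) :=
  (List.range (pvK p).toNat).map (fun (i : Nat) => ((pvFilt p ((i : Int) + 1)).map Prod.fst).reverse)
def pvTop (p : List Int) (m : Int) : Int := (((pvFilt p m).map Prod.fst).reverse).headD 0

-- the standing invariant of the DP pile list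
def pvInv (p : List Int) : Prop :=
  (∀ v ∈ pvPileList p, 1 ≤ v) ∧
  (pvPairs p).Pairwise (fun a b => a.2 = b.2 → b.1 ≤ a.1) ∧
  (∀ i, ∀ hi : i < (pvPairs p).length, 2 ≤ ((pvPairs p)[i]'hi).2 →
    ∃ j, ∃ _ : j < i, ((pvPairs p)[j]'(by omega)).2 = ((pvPairs p)[i]'hi).2 - 1 ∧
      ((pvPairs p)[j]'(by omega)).1 < ((pvPairs p)[i]'hi).1) ∧
  (∀ m : Int, 1 ≤ m → m ≤ pvK p → ∃ yv ∈ pvPairs p, yv.2 = m)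

theorem pv_len_aux (P : List Int) : ∀ (l acc : List Int),
    (l.foldl (fun pile x => pile ++ [pvBest P pile x + 1]) acc).length = acc.length + l.length := by
  intro l
  induction l with
  | nil => intro acc; simp
  | cons x t ih => intro acc; simp [List.foldl_cons, ih]; omega

theorem pv_len_piles (p : List Int) : (pvPileList p).length = p.length := by
  simpa using pv_len_aux p p []

theorem pv_zip_prefix : ∀ (pile p q : List Int), pile.length ≤ p.length →
    (p ++ q).zip pile = p.zip pile := by
  intro pile
  induction pile with
  | nil => intro p q _; simp
  | cons v vs ih =>
    intro p q h
    cases p with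
    | nil => simp at h
    | cons y ys => simp only [List.cons_append, List.zip_cons_cons, List.length_cons] at *
                   rw [ih ys q (by omega)]

theorem pv_best_prefix (p q pile : List Int) (x : Int) (h : pile.length ≤ p.length) :
    pvBest (p ++ q) pile x = pvBest p pile x := by
  unfold pvBest; rw [pv_zip_prefix pile p q h]

theorem pv_fold_agree (p q : List Int) : ∀ (l acc : List Int),
    acc.length + l.length ≤ p.length →
    l.foldl (fun pile x => pile ++ [pvBest (p ++ q) pile x + 1]) acc =
    l.foldl (fun pile x => pile ++ [pvBest p pile x + 1]) acc := by
  intro l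
  induction l with
  | nil => intro acc _; rfl
  | cons x t ih =>
    intro acc h
    simp only [List.foldl_cons]
    rw [pv_best_prefix p q acc x (by simp at h; omega)]
    exact ih _ (by simp at h ⊢; omega)

theorem pv_piles_snoc (p : List Int) (x : Int) :
    pvPileList (p ++ [x]) = pvPileList p ++ [pvBest p (pvPileList p) x + 1] := by
  unfold pvPileList
  rw [List.foldl_append]
  rw [pv_fold_agree p [x] p [] (by simp)]
  simp only [List.foldl_cons, List.foldl_nil]
  rw [pv_best_prefix p [x] _ x (by rw [show p.foldl (fun pile x => pile ++ [pvBest p pile x + 1]) [] = pvPileList p from rfl, pv_len_piles])]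

theorem pv_pairs_snoc (p : List Int) (x : Int) :
    pvPairs (p ++ [x]) = pvPairs p ++ [(x, pvBest p (pvPileList p) x + 1)] := by
  unfold pvPairs
  rw [pv_piles_snoc, List.zip_append (by rw [pv_len_piles])]
  rfl

theorem pv_K_snoc (p : List Int) (x : Int) :
    pvK (p ++ [x]) = max (pvK p) (pvBest p (pvPileList p) x + 1) := by
  unfold pvK
  rw [pv_piles_snoc, List.foldl_append]
  rfl

-- facts about the running-max inner loop
theorem pv_mf_ge (x : Int) : ∀ (l : List (Int × Int)) (b : Int),
    b ≤ l.foldl (fun best yv => if yv.1 < x ∧ yv.2 > best then yv.2 else best) b := by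
  intro l
  induction l with
  | nil => intro b; simp
  | cons yv t ih =>
    intro b
    simp only [List.foldl_cons]
    have := ih (if yv.1 < x ∧ yv.2 > b then yv.2 else b)
    split_ifs at this ⊢ with h
    · omega
    · exact this

theorem pv_mf_mem (x : Int) : ∀ (l : List (Int × Int)) (b : Int) (yv : Int × Int),
    yv ∈ l → yv.1 < x →
    yv.2 ≤ l.foldl (fun best yv => if yv.1 < x ∧ yv.2 > best then yv.2 else best) b := by
  intro l
  induction l with
  | nil => intro b yv h; simp at h
  | cons e t ih =>
    intro b yv hmem hx
    simp only [List.foldl_cons]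
    rcases List.mem_cons.mp hmem with h | h
    · subst h
      have hb' : yv.2 ≤ (if yv.1 < x ∧ yv.2 > b then yv.2 else b) := by
        by_cases h2 : yv.2 > b
        · rw [if_pos ⟨hx, h2⟩]
        · rw [if_neg (fun hc => h2 hc.2)]
          omega
      exact le_trans hb' (pv_mf_ge x t _)
    · exact ih _ yv h hx

theorem pv_mf_cases (x : Int) : ∀ (l : List (Int × Int)) (b : Int),
    l.foldl (fun best yv => if yv.1 < x ∧ yv.2 > best then yv.2 else best) b = b ∨
    ∃ yv ∈ l, yv.1 < x ∧
      l.foldl (fun best yv => if yv.1 < x ∧ yv.2 > best then yv.2 else best) b = yv.2 := by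
  intro l
  induction l with
  | nil => intro b; left; rfl
  | cons e t ih =>
    intro b
    simp only [List.foldl_cons]
    rcases ih (if e.1 < x ∧ e.2 > b then e.2 else b) with h | h
    · rw [h]
      split_ifs with h'
      · right; exact ⟨e, List.mem_cons_self .., h'.1, rfl⟩
      · left; rfl
    · right
      obtain ⟨yv, hm, hx, he⟩ := h
      exact ⟨yv, List.mem_cons_of_mem _ hm, hx, he⟩

theorem pv_best_nonneg (p pile : List Int) (x : Int) : 0 ≤ pvBest p pile x :=
  pv_mf_ge x _ 0

theorem pv_K_nonneg (p : List Int) : 0 ≤ pvK p :=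
  (PySem.List.le_foldl_max (pvPileList p) 0).1

theorem pv_K_ub (p : List Int) (v : Int) (hv : v ∈ pvPileList p) : v ≤ pvK p :=
  (PySem.List.le_foldl_max (pvPileList p) 0).2 v hv

theorem pv_pairs_snd_mem (p : List Int) (yv : Int × Int) (h : yv ∈ pvPairs p) :
    yv.2 ∈ pvPileList p := by
  obtain ⟨-, h2⟩ := List.of_mem_zip (by exact h)
  exact h2

theorem pv_best_le_K (p : List Int) (x : Int) : pvBest p (pvPileList p) x ≤ pvK p := by
  rcases pv_mf_cases x (pvPairs p) 0 with h | ⟨yv, hm, -, he⟩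
  · rw [show pvBest p (pvPileList p) x =
      (pvPairs p).foldl (fun best yv => if yv.1 < x ∧ yv.2 > best then yv.2 else best) 0 from rfl, h]
    exact pv_K_nonneg p
  · rw [show pvBest p (pvPileList p) x =
      (pvPairs p).foldl (fun best yv => if yv.1 < x ∧ yv.2 > best then yv.2 else best) 0 from rfl, he]
    exact pv_K_ub p yv.2 (pv_pairs_snd_mem p yv hm)

-- the invariant holds for every prefix
theorem pv_piles_inv : ∀ p : List Int, pvInv p := by
  intro p
  induction p using List.reverseRecOn with
  | nil =>
    refine ⟨?_, ?_, ?_, ?_⟩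
    · simp [pvPileList]
    · simp [pvPairs, pvPileList]
    · simp [pvPairs, pvPileList]
    · intro m h1 h2
      simp [pvK, pvPileList] at h2
      omega
  | append_singleton p x ih =>
    obtain ⟨h1, h2, h3, h4⟩ := ih
    have hsn := pv_pairs_snoc p x
    have hK := pv_K_snoc p x
    set bP := pvBest p (pvPileList p) x with hbP
    have hb0 : 0 ≤ bP := pv_best_nonneg p (pvPileList p) x
    have hbK : bP ≤ pvK p := pv_best_le_K p x
    have hbceq : pvBest p (pvPileList p) x =
        (pvPairs p).foldl (fun best yv => if yv.1 < x ∧ yv.2 > best then yv.2 else best) 0 := rfl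
    refine ⟨?_, ?_, ?_, ?_⟩
    · intro v hv
      rw [pv_piles_snoc] at hv
      rcases List.mem_append.mp hv with h | h
      · exact h1 v h
      · simp at h; omega
    · rw [hsn]
      apply List.pairwise_append.mpr
      refine ⟨h2, by simp, ?_⟩
      intro a ha b hb hab
      simp at hb
      subst hb
      simp only at hab
      by_contra hlt
      have := pv_mf_mem x (pvPairs p) 0 a ha (by omega)
      rw [← hbceq] at this
      omega
    · intro i hi h2i
      simp only [hsn] at hi h2i ⊢
      simp only [List.length_append, List.length_cons, List.length_nil] at hi
      by_cases hcase : i < (pvPairs p).length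
      · have h2i' : 2 ≤ ((pvPairs p)[i]'hcase).2 := by
          rwa [List.getElem_append_left hcase] at h2i
        obtain ⟨j, hj, hval, hlt⟩ := h3 i hcase h2i'
        refine ⟨j, hj, ?_, ?_⟩ <;>
          rw [List.getElem_append_left hcase, List.getElem_append_left (by omega)] <;>
          [exact hval; exact hlt]
      · have hieq : i = (pvPairs p).length := by omega
        subst hieq
        have hgetlast : ((pvPairs p ++ [(x, bP + 1)])[(pvPairs p).length]'(by simp)) = (x, bP + 1) := by
          simp
        rw [hgetlast] at h2i ⊢
        have hb1 : 1 ≤ bP := by simp at h2i; omega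
        rcases pv_mf_cases x (pvPairs p) 0 with h | ⟨yv, hm, hyx, he⟩
        · rw [← hbceq] at h; omega
        · rw [← hbceq] at he
          obtain ⟨j, hjlt, hget⟩ := List.mem_iff_getElem.mp hm
          refine ⟨j, by omega, ?_, ?_⟩ <;> rw [List.getElem_append_left hjlt, hget] <;> simp <;> omega
    · intro m hm1 hmK
      rw [hK] at hmK
      rw [hsn]
      by_cases hc : m ≤ pvK p
      · obtain ⟨yv, hmem, hval⟩ := h4 m hm1 hc
        exact ⟨yv, List.mem_append_left _ hmem, hval⟩
      · have : m = bP + 1 := by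
          simp only [le_max_iff] at hmK
          omega
        exact ⟨(x, bP + 1), List.mem_append_right _ (by simp), by simp [this]⟩

-- membership facts for pvFilt
theorem pv_filt_sub (p : List Int) (m : Int) (yv : Int × Int) (h : yv ∈ pvFilt p m) :
    yv ∈ pvPairs p ∧ yv.2 = m := by
  have := List.mem_filter.mp h
  simpa using this

theorem pv_filt_ne_nil (p : List Int) (hinv : pvInv p) (m : Int) (hm1 : 1 ≤ m) (hmK : m ≤ pvK p) :
    pvFilt p m ≠ [] := by
  obtain ⟨yv, hmem, hval⟩ := hinv.2.2.2 m hm1 hmK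
  intro hnil
  have : yv ∈ pvFilt p m := List.mem_filter.mpr ⟨hmem, by simp [hval]⟩
  rw [hnil] at this
  simp at this

-- the top of pile m: the last card put on it; it is the least card of the pile
theorem pv_top_spec (p : List Int) (hinv : pvInv p) (m : Int) (hne : pvFilt p m ≠ []) :
    ∃ e, e ∈ pvPairs p ∧ e.2 = m ∧ pvTop p m = e.1 ∧ ∀ yv ∈ pvFilt p m, e.1 ≤ yv.1 := by
  obtain ⟨l', e, hsplit⟩ : ∃ l' e, pvFilt p m = l' ++ [e] :=
    ⟨(pvFilt p m).dropLast, (pvFilt p m).getLast hne,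
      ((pvFilt p m).dropLast_append_getLast hne).symm⟩
  refine ⟨e, ?_, ?_, ?_, ?_⟩
  · exact (pv_filt_sub p m e (by rw [hsplit]; simp)).1
  · exact (pv_filt_sub p m e (by rw [hsplit]; simp)).2
  · unfold pvTop
    rw [hsplit]
    simp
  · intro yv hyv
    have hpw : (pvFilt p m).Pairwise (fun a b => a.2 = b.2 → b.1 ≤ a.1) :=
      List.Pairwise.filter _ hinv.2.1
    rw [hsplit] at hpw hyv
    rcases List.mem_append.mp hyv with h | h
    · have := (List.pairwise_append.mp hpw).2.2 yv h e (by simp)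
      have h2a := (pv_filt_sub p m yv (by rw [hsplit]; exact List.mem_append_left _ h)).2
      have h2b := (pv_filt_sub p m e (by rw [hsplit]; simp)).2
      exact this (by rw [h2a, h2b])
    · simp at h; subst h; exact le_refl _
  -- (uses that a concat split exists; List.exists_concat_of_ne_nil)

-- strictly increasing pile tops
theorem pv_tops_lt (p : List Int) (hinv : pvInv p) (m : Int) (hm1 : 1 ≤ m) (hmK : m + 1 ≤ pvK p) :
    pvTop p m < pvTop p (m + 1) := by
  have hne1 : pvFilt p (m + 1) ≠ [] := pv_filt_ne_nil p hinv (m + 1) (by omega) hmK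
  obtain ⟨e, hemem, heval, hetop, -⟩ := pv_top_spec p hinv (m + 1) hne1
  obtain ⟨i, hilt, higet⟩ := List.mem_iff_getElem.mp hemem
  have h2i : 2 ≤ ((pvPairs p)[i]'hilt).2 := by rw [higet]; omega
  obtain ⟨j, hjlt, hjval, hjx⟩ := hinv.2.2.1 i hilt h2i
  have hjmem : (pvPairs p)[j]'(by omega) ∈ pvFilt p m := by
    apply List.mem_filter.mpr
    refine ⟨List.getElem_mem _, by simp [hjval, higet, heval]⟩
  have hne0 : pvFilt p m ≠ [] := by intro h; rw [h] at hjmem; simp at hjmem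
  obtain ⟨e0, -, -, he0top, he0min⟩ := pv_top_spec p hinv m hne0
  have := he0min _ hjmem
  rw [hetop, he0top]
  rw [higet] at hjx
  omega

theorem pv_tops_mono (p : List Int) (hinv : pvInv p) (m m' : Int)
    (hm1 : 1 ≤ m) (hmm : m ≤ m') (hm'K : m' ≤ pvK p) : pvTop p m ≤ pvTop p m' := by
  have key : ∀ d : Nat, m + d ≤ pvK p → pvTop p m ≤ pvTop p (m + d) := by
    intro d
    induction d with
    | zero => intro _; simp
    | succ n ih =>
      intro h
      have h1 := ih (by push_cast at h ⊢; omega)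
      have h2 := pv_tops_lt p hinv (m + n) (by omega) (by push_cast at h ⊢; omega)
      push_cast at h1 h2 ⊢
      calc pvTop p m ≤ pvTop p (m + n) := h1
        _ ≤ pvTop p (m + n + 1) := le_of_lt h2
        _ = pvTop p (m + (n + 1)) := by ring_nf
  have : m' = m + ((m' - m).toNat : Int) := by omega
  rw [this]
  exact key (m' - m).toNat (by omega)

-- generic characterisation of PySem's bisect_left loop
theorem pv_loop_eq {α : Type} [LT α] [DecidableLT α] (xs : List α) (x : α) (r : Nat)
    (h1 : ∀ j, ∀ hj : j < xs.length, j < r → xs[j]'hj < x)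
    (h2 : ∀ j, ∀ hj : j < xs.length, r ≤ j → ¬ xs[j]'hj < x) :
    ∀ fuel lo hi, hi ≤ xs.length → hi - lo ≤ fuel → lo ≤ r → r ≤ hi →
      PySem.List.bisectLeftLoop xs x fuel lo hi = r := by
  intro fuel
  induction fuel with
  | zero =>
    intro lo hi _ hfl hlo hhi
    simp only [PySem.List.bisectLeftLoop]
    omega
  | succ n ih =>
    intro lo hi hlen hfl hlo hhi
    rw [PySem.List.bisectLeftLoop]
    by_cases hc : lo < hi
    · rw [if_pos hc]
      have hmid : (lo + hi) / 2 < xs.length := by omega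
      rw [List.getElem?_eq_getElem hmid]
      simp only
      by_cases hx : xs[(lo + hi) / 2]'hmid < x
      · rw [if_pos hx]
        have hrgt : (lo + hi) / 2 < r := by
          by_contra hcon
          exact h2 _ hmid (by omega) hx
        exact ih ((lo + hi) / 2 + 1) hi hlen (by omega) (by omega) hhi
      · rw [if_neg hx]
        have hrle : r ≤ (lo + hi) / 2 := by
          by_contra hcon
          exact hx (h1 _ hmid (by omega))
        exact ih lo ((lo + hi) / 2) (by omega) (by omega) hlo hrle
    · rw [if_neg hc]
      omega

theorem pv_bisect_eq {α : Type} [LT α] [DecidableLT α] (xs : List α) (x : α) (r : Nat)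
    (hr : r ≤ xs.length)
    (h1 : ∀ j, ∀ hj : j < xs.length, j < r → xs[j]'hj < x)
    (h2 : ∀ j, ∀ hj : j < xs.length, r ≤ j → ¬ xs[j]'hj < x) :
    PySem.List.bisectLeft xs x = r :=
  pv_loop_eq xs x r h1 h2 xs.length 0 xs.length le_rfl (by omega) (by omega) hr

-- Python's list comparison: a nonempty list against the singleton [x]
theorem pv_lt_single (s : List Int) (x : Int) (hne : s ≠ []) :
    (s < ([x] : List Int)) ↔ s.headD 0 < x := by
  cases s with
  | nil => exact absurd rfl hne
  | cons h t =>
    constructor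
    · intro hl
      cases hl with
      | rel h => exact h
      | cons h' => cases h'
    · intro hx
      exact List.Lex.rel hx

-- bucket structure
theorem pv_buckets_length (p : List Int) : (pvBuckets p).length = (pvK p).toNat := by
  unfold pvBuckets; simp

theorem pv_buckets_getElem (p : List Int) (j : Nat) (hj : j < (pvK p).toNat) :
    (pvBuckets p)[j]'(by rw [pv_buckets_length]; exact hj) =
      ((pvFilt p ((j : Int) + 1)).map Prod.fst).reverse := by
  unfold pvBuckets
  rw [List.getElem_map, List.getElem_range]

theorem pv_buckets_ne_nil (p : List Int) (hinv : pvInv p) (j : Nat) (hj : j < (pvK p).toNat) :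
    ((pvFilt p ((j : Int) + 1)).map Prod.fst).reverse ≠ [] := by
  have := pv_filt_ne_nil p hinv ((j : Int) + 1) (by omega) (by omega)
  simp [this]

theorem pv_buckets_head (p : List Int) (j : Nat) :
    (((pvFilt p ((j : Int) + 1)).map Prod.fst).reverse).headD 0 = pvTop p ((j : Int) + 1) := rfl

-- the bisect over the stacks finds exactly the DP pile index
theorem pv_bisect_buckets (p : List Int) (hinv : pvInv p) (x : Int) :
    PySem.List.bisectLeft (pvBuckets p) [x] = (pvBest p (pvPileList p) x).toNat := by
  set bP := pvBest p (pvPileList p) x with hbP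
  have hb0 : 0 ≤ bP := pv_best_nonneg p (pvPileList p) x
  have hbK : bP ≤ pvK p := pv_best_le_K p x
  have hbceq : pvBest p (pvPileList p) x =
      (pvPairs p).foldl (fun best yv => if yv.1 < x ∧ yv.2 > best then yv.2 else best) 0 := rfl
  apply pv_bisect_eq
  · rw [pv_buckets_length]; omega
  · -- indices below bP.toNat: stack top < x
    intro j hj hjr
    rw [pv_buckets_length] at hj
    rw [pv_buckets_getElem p j hj]
    rw [pv_lt_single _ x (pv_buckets_ne_nil p hinv j hj), pv_buckets_head]
    -- top (j+1) ≤ top bP < x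
    have hb1 : 1 ≤ bP := by omega
    rcases pv_mf_cases x (pvPairs p) 0 with h | ⟨yv, hm, hyx, he⟩
    · rw [← hbceq, ← hbP] at h; omega
    · rw [← hbceq, ← hbP] at he
      have hyvf : yv ∈ pvFilt p bP := List.mem_filter.mpr ⟨hm, by simp [he]⟩
      have hnef : pvFilt p bP ≠ [] := by intro h; rw [h] at hyvf; simp at hyvf
      obtain ⟨e, -, -, hetop, hemin⟩ := pv_top_spec p hinv bP hnef
      have htb : pvTop p bP < x := by
        have := hemin yv hyvf
        omega
      have := pv_tops_mono p hinv ((j : Int) + 1) bP (by omega) (by omega) hbK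
      omega
  · -- indices at or above bP.toNat: stack top ≥ x
    intro j hj hjr
    rw [pv_buckets_length] at hj
    rw [pv_buckets_getElem p j hj]
    rw [pv_lt_single _ x (pv_buckets_ne_nil p hinv j hj), pv_buckets_head]
    intro hlt
    have hnef : pvFilt p ((j : Int) + 1) ≠ [] :=
      pv_filt_ne_nil p hinv _ (by omega) (by omega)
    obtain ⟨e, hemem, heval, hetop, -⟩ := pv_top_spec p hinv ((j : Int) + 1) hnef
    have := pv_mf_mem x (pvPairs p) 0 e hemem (by omega)
    rw [← hbceq, ← hbP] at this
    omega

-- one step of A, on the bucket representation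
theorem pv_filt_snoc (p : List Int) (x m : Int) :
    pvFilt (p ++ [x]) m =
      pvFilt p m ++ (if pvBest p (pvPileList p) x + 1 = m
        then [(x, pvBest p (pvPileList p) x + 1)] else []) := by
  unfold pvFilt
  rw [pv_pairs_snoc, List.filter_append]
  congr 1
  split_ifs with h <;> simp [h]

theorem pv_filt_top_eq_nil (p : List Int) (m : Int) (hm : pvK p < m) : pvFilt p m = [] := by
  apply List.filter_eq_nil_iff.mpr
  intro yv hyv
  have := pv_K_ub p yv.2 (pv_pairs_snd_mem p yv hyv)
  simp
  omega

theorem pv_stepA_buckets (p : List Int) (hinv : pvInv p) (x : Int) :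
    pvStepA (pvBuckets p) x = pvBuckets (p ++ [x]) := by
  have hb0 : 0 ≤ pvBest p (pvPileList p) x := pv_best_nonneg p (pvPileList p) x
  have hbK : pvBest p (pvPileList p) x ≤ pvK p := pv_best_le_K p x
  have hK0 : 0 ≤ pvK p := pv_K_nonneg p
  have hbis : PySem.List.bisectLeft (pvBuckets p) [x] = (pvBest p (pvPileList p) x).toNat :=
    pv_bisect_buckets p hinv x
  have hKs : pvK (p ++ [x]) = max (pvK p) (pvBest p (pvPileList p) x + 1) := pv_K_snoc p x
  have hlen : (pvBuckets p).length = (pvK p).toNat := pv_buckets_length p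
  set bP := pvBest p (pvPileList p) x with hbP
  unfold pvStepA
  simp only [hbis, hlen]
  by_cases hcase : bP = pvK p
  · -- x starts a new stack: bisect returned len(stacks)
    rw [if_neg (by simp [hcase])]
    have hK' : pvK (p ++ [x]) = pvK p + 1 := by rw [hKs]; omega
    unfold pvBuckets
    rw [hK']
    have : (pvK p + 1).toNat = (pvK p).toNat + 1 := by omega
    rw [this, List.range_succ, List.map_append, List.map_cons, List.map_nil]
    congr 1
    · -- the old stacks are unchanged
      apply List.map_congr_left
      intro j hj
      have hjlt : j < (pvK p).toNat := List.mem_range.mp hj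
      rw [pv_filt_snoc, if_neg (by omega), List.append_nil]
    · -- the new stack is [x]
      rw [pv_filt_snoc, if_pos (by omega), pv_filt_top_eq_nil p _ (by omega)]
      simp
  · -- x is prepended to stack bP
    have hblt : bP < pvK p := lt_of_le_of_ne hbK hcase
    rw [if_pos (by omega)]
    rw [PySem.List.insert_zero]
    have hK' : pvK (p ++ [x]) = pvK p := by rw [hKs]; omega
    have hget : (pvBuckets p).getD bP.toNat [] =
        ((pvFilt p (((bP.toNat : Nat) : Int) + 1)).map Prod.fst).reverse := by
      rw [List.getD_eq_getElem _ _ (by rw [hlen]; omega)]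
      exact pv_buckets_getElem p bP.toNat (by omega)
    rw [hget]
    apply List.ext_getElem
    · simp [pvBuckets, hK']
    · intro j hj1 hj2
      simp only [List.length_set, pv_buckets_length] at hj1
      rw [List.getElem_set]
      rw [pv_buckets_getElem (p ++ [x]) j (by rw [hK']; exact hj1)]
      rw [pv_filt_snoc]
      by_cases hji : bP.toNat = j
      · rw [if_pos hji, if_pos (by omega)]
        subst hji
        simp
      · rw [if_neg hji, if_neg (by omega), List.append_nil]
        exact pv_buckets_getElem p j hj1

-- A's whole loop produces the buckets
theorem pv_A_eq_buckets : ∀ p : List Int, patience_sort p = pvBuckets p := by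
  intro p
  induction p using List.reverseRecOn with
  | nil => rfl
  | append_singleton p x ih =>
    unfold patience_sort at *
    rw [List.foldl_append, List.foldl_cons, List.foldl_nil, ih]
    exact pv_stepA_buckets p (pv_piles_inv p) x

-- max(pile, default=0) is the foldl max
theorem pv_maxD_eq (p : List Int) :
    PySem.List.maxD (pvPileList p) (fun v => v) 0 = pvK p := by
  have h1 := (pv_piles_inv p).1
  unfold pvK
  cases hp : pvPileList p with
  | nil => rfl
  | cons v t =>
    have hv : 1 ≤ v := by rw [hp] at h1; exact h1 v (by simp)
    unfold PySem.List.maxD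
    rw [PySem.List.max?_id_cons]
    simp only [Option.getD_some, List.foldl_cons]
    congr 1
    omega

-- the backward bucketing pass builds exactly the buckets
theorem pv_back_fold (K : Nat) : ∀ (l : List (Int × Int)),
    (∀ yv ∈ l, 1 ≤ yv.2 ∧ yv.2 ≤ (K : Int)) →
    (l.reverse).foldl
      (fun st xv => st.set (xv.2 - 1).toNat (st.getD (xv.2 - 1).toNat [] ++ [xv.1]))
      (List.replicate K ([] : List Int)) =
    (List.range K).map (fun (i : Nat) => ((l.filter (fun yv => yv.2 == (i : Int) + 1)).map Prod.fst).reverse) := by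
  intro l
  induction l with
  | nil =>
    intro _
    apply List.ext_getElem
    · simp
    · intro j h1 h2
      simp [List.getElem_replicate]
  | cons e t ih =>
    intro hb
    have he := hb e (List.mem_cons_self ..)
    have ht : ∀ yv ∈ t, 1 ≤ yv.2 ∧ yv.2 ≤ (K : Int) := fun yv h => hb yv (List.mem_cons_of_mem _ h)
    rw [List.reverse_cons, List.foldl_append, ih ht]
    simp only [List.foldl_cons, List.foldl_nil]
    have hi0 : (e.2 - 1).toNat < K := by omega
    apply List.ext_getElem
    · simp
    · intro j hj1 hj2
      simp only [List.length_set, List.length_map, List.length_range] at hj1 hj2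
      rw [List.getElem_set]
      conv_rhs => rw [List.getElem_map, List.getElem_range]
      rw [List.filter_cons]
      by_cases hji : (e.2 - 1).toNat = j
      · rw [if_pos hji]
        have hcond : (e.2 == (j : Int) + 1) = true := by simp; omega
        rw [hcond]
        simp only [if_true]
        rw [List.getD_eq_getElem _ _ (by simp; omega)]
        rw [List.getElem_map, List.getElem_range]
        rw [hji]
        simp
      · rw [if_neg hji]
        have hcond : (e.2 == (j : Int) + 1) = false := by simp; omega
        rw [hcond]
        simp only [Bool.false_eq_true, if_false]
        rw [List.getElem_map, List.getElem_range]

theorem pv_B_eq_buckets (p : List Int) : patience_sort_alt p = pvBuckets p := by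
  have h1 := (pv_piles_inv p).1
  have hK0 : 0 ≤ pvK p := pv_K_nonneg p
  have hbounds : ∀ yv ∈ pvPairs p, 1 ≤ yv.2 ∧ yv.2 ≤ (((pvK p).toNat : Nat) : Int) := by
    intro yv hyv
    have hv1 := h1 yv.2 (pv_pairs_snd_mem p yv hyv)
    have hv2 := pv_K_ub p yv.2 (pv_pairs_snd_mem p yv hyv)
    constructor
    · exact hv1
    · omega
  unfold patience_sort_alt
  simp only [pv_maxD_eq]
  have := pv_back_fold (pvK p).toNat (pvPairs p) hbounds
  unfold pvPairs at this
  rw [this]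
  unfold pvBuckets pvFilt pvPairs
  rfl

-- ===== VERDICT (by name: the statement is the Claim_ definition above) =====
theorem patience_sort_spec : Claim_equal_patience_sort := by
  intro permlist _
  unfold Spec_patience_sort
  rw [pv_A_eq_buckets, pv_B_eq_buckets]
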